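-- pv_equiv track=rewrite | github.com/iop2000win/Algorithm | TCT_sorting_tuto.py | solution
-- ===== SOURCE A (Python) =====
-- def solution(N, K, list_A, list_B):
-- 	list_A = sorted(list_A)
-- 	list_B = sorted(list_B)
--
-- 	for i in range(K):
-- 		if list_A[i] < list_B[i]:
-- 			list_A[i], list_B[i] = list_B[i], list_A[i]
-- 		else:
-- 			break
--
-- 	return sum(list_A)
-- ===== SOURCE B (Python) =====
-- def solution(N, K, list_A, list_B):
--     a = list(list_A)
--     b = list(list_B)
--     total = 0
--     k = K
--     while k > 0 and a and b:
--         x = min(a)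
--         y = min(b)
--         if x >= y:
--             break
--         a.remove(x)
--         b.remove(y)
--         total += y
--         k -= 1
--     return total + sum(a)
-- ===== Notes on version B (the rewrite author's own statement) =====
-- stated objective: alternative
-- what changed: B does not sort at all: it repeatedly extracts the minimum of each remaining list by linear scan (min + remove), adding min(B) while it exceeds min(A) and the swap budget lasts, then adds the sum of what is left of A; A instead sorts both lists, swaps a prefix in place and re-sums.
import Mathlib
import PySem

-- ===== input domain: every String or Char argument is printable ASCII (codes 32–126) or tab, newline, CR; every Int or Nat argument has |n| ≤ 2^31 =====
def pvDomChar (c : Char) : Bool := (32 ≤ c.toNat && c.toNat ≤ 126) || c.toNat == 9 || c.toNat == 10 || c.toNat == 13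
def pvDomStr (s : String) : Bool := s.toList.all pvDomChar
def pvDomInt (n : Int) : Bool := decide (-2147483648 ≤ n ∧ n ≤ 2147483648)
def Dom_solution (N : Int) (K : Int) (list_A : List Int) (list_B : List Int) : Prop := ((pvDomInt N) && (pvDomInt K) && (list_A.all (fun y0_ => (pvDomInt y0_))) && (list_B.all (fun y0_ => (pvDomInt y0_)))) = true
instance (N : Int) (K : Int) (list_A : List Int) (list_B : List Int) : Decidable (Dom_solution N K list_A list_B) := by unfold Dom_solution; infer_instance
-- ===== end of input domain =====

-- B replaces A's sort + in-place prefix swap + re-sum by a sort-free selection loop: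
-- repeatedly take the minimum of each remaining list (min + remove), adding min(B)
-- while it beats min(A) and the budget lasts, then add the sum of the rest of A
-- (objective: alternative algorithm; same return value).

-- ===== PORT A =====
-- the for-i-in-range(K) loop: swap while list_A[i] < list_B[i], break otherwise;
-- the out-of-range case (Python IndexError, excluded by Pre_) stops the loop.
def solutionLoopA : Nat → Nat → List Int → List Int → List Int × List Int
  | _, 0, a, b => (a, b)
  | i, k+1, a, b =>
    match PySem.List.pyGet? a (i : Int), PySem.List.pyGet? b (i : Int) with
    | some x, some y =>
      if x < y then solutionLoopA (i+1) k (a.set i y) (b.set i x) else (a, b)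
    | _, _ => (a, b)

def solution (N : Int) (K : Int) (list_A : List Int) (list_B : List Int) : Int :=
  let sa := PySem.List.sorted list_A (fun x => x) false
  let sb := PySem.List.sorted list_B (fun x => x) false
  ((solutionLoopA 0 K.toNat sa sb).1).sum

-- ===== PORT B =====
-- remove? shrinks the list (used for the while-loop's termination)
theorem pvRemoveLen {a a' : List Int} {x : Int}
    (h : PySem.List.remove? a x = some a') : a'.length < a.length := by
  have hx : x ∈ a := by
    by_contra hc
    rw [(PySem.List.remove?_eq_none_iff a x).mpr hc] at h
    simp at h
  rw [PySem.List.remove?_eq_some_erase a x hx] at h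
  cases h
  simpa [List.length_erase, hx] using Nat.sub_lt (List.length_pos_of_mem hx) one_pos

-- the while-loop: x = min(a), y = min(b); break if x >= y, else remove both,
-- total += y, k -= 1; afterwards return total + sum(a).  The inner 'none'
-- branches are unreachable (min of a nonempty list is a member) but transcribe
-- Python's min/remove as the PySem primitives.
def solutionSelLoop (k : Int) (a b : List Int) (total : Int) : Int :=
  if k > 0 ∧ a ≠ [] ∧ b ≠ [] then
    match PySem.List.min? a (fun z => z), PySem.List.min? b (fun z => z) with
    | some x, some y =>
      if x ≥ y then total + a.sum
      else
        match ha' : PySem.List.remove? a x, PySem.List.remove? b y with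
        | some a', some b' =>
          have := pvRemoveLen ha'
          solutionSelLoop (k - 1) a' b' (total + y)
        | _, _ => total + a.sum
    | _, _ => total + a.sum
  else total + a.sum
termination_by a.length

def solution_alt (N : Int) (K : Int) (list_A : List Int) (list_B : List Int) : Int :=
  solutionSelLoop K list_A list_B 0

-- ===== PRECONDITION & SPEC =====
-- Pre_ holds exactly where Python A returns: either range(K) stays in bounds, or some
-- in-bounds sorted pair is non-increasing so the loop breaks before the IndexError.
def Pre_solution (N : Int) (K : Int) (list_A : List Int) (list_B : List Int) : Prop :=
  K ≤ (min list_A.length list_B.length : Int) ∨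
  ∃ i < min list_A.length list_B.length,
    ¬ ((PySem.List.sorted list_A (fun x => x) false).getD i 0 <
       (PySem.List.sorted list_B (fun x => x) false).getD i 0)

instance (N : Int) (K : Int) (list_A : List Int) (list_B : List Int) : Decidable (Pre_solution N K list_A list_B) := by unfold Pre_solution; infer_instance

def pvWitness_solution : Int × Int × List Int × List Int := (3, 1, [1, 2, 3], [4, 5, 6])

def Spec_solution (N : Int) (K : Int) (list_A : List Int) (list_B : List Int) (out : Int) : Prop := out = solution_alt N K list_A list_B
instance (N : Int) (K : Int) (list_A : List Int) (list_B : List Int) (out : Int) : Decidable (Spec_solution N K list_A list_B out) := by unfold Spec_solution; infer_instance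

-- ===== CLAIM (what is proved, stated in full; the proofs are below) =====
def Claim_equal_solution : Prop := ∀ (N : Int) (K : Int) (list_A : List Int) (list_B : List Int), Dom_solution N K list_A list_B → Pre_solution N K list_A list_B → Spec_solution N K list_A list_B (solution N K list_A list_B)

-- ===== LEMMAS AND PROOFS =====

-- the budget-limited gain of a pair list: add (y-x) while x < y, stop at the first failure
def gainN : Nat → List (Int × Int) → Int
  | 0, _ => 0
  | _+1, [] => 0
  | k+1, (x, y) :: r => if x < y then (y - x) + gainN k r else 0

theorem gainN_nil (k : Nat) : gainN k [] = 0 := by cases k <;> rfl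

theorem sum_set_int (a : List Int) (i : Nat) (y : Int) (h : i < a.length) :
    (a.set i y).sum = a.sum - a[i] + y := by
  induction a generalizing i with
  | nil => simp at h
  | cons hd tl ih =>
    cases i with
    | zero => simp [List.set]; ring
    | succ j =>
      simp only [List.set, List.sum_cons, List.getElem_cons_succ]
      rw [ih j (by simpa using h)]
      ring

theorem drop_set_succ (a : List Int) (i : Nat) (y : Int) :
    (a.set i y).drop (i+1) = a.drop (i+1) := by
  apply List.ext_getElem
  · simp
  · intro n h1 h2
    simp only [List.getElem_drop]
    rw [List.getElem_set_ne (by omega)]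

theorem solutionLoopA_sum (k i : Nat) (a b : List Int) :
    ((solutionLoopA i k a b).1).sum = a.sum + gainN k ((a.drop i).zip (b.drop i)) := by
  induction k generalizing i a b with
  | zero => simp [solutionLoopA, gainN]
  | succ k ih =>
    by_cases ha : i < a.length
    · by_cases hb : i < b.length
      · have ga : PySem.List.pyGet? a (i : Int) = some a[i] := by
          rw [PySem.List.pyGet?_natCast]; exact List.getElem?_eq_getElem ha
        have gb : PySem.List.pyGet? b (i : Int) = some b[i] := by
          rw [PySem.List.pyGet?_natCast]; exact List.getElem?_eq_getElem hb
        have da : a.drop i = a[i] :: a.drop (i+1) := List.drop_eq_getElem_cons ha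
        have db : b.drop i = b[i] :: b.drop (i+1) := List.drop_eq_getElem_cons hb
        rw [solutionLoopA, ga, gb]
        by_cases hlt : a[i] < b[i]
        · simp only [hlt, if_true]
          rw [ih (i+1) (a.set i b[i]) (b.set i a[i])]
          rw [sum_set_int a i b[i] ha, drop_set_succ, drop_set_succ]
          rw [da, db]
          simp only [List.zip_cons_cons, gainN, hlt, if_true]
          ring
        · simp only [hlt, if_false]
          rw [da, db]
          simp only [List.zip_cons_cons, gainN, hlt, if_false]
          ring
      · have gb : PySem.List.pyGet? b (i : Int) = none := by
          rw [PySem.List.pyGet?_natCast]; exact List.getElem?_eq_none (by omega)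
        rw [solutionLoopA, gb]
        have : b.drop i = [] := List.drop_eq_nil_of_le (by omega)
        cases hga : PySem.List.pyGet? a (i : Int) <;> simp [this, gainN_nil]
    · have ga : PySem.List.pyGet? a (i : Int) = none := by
        rw [PySem.List.pyGet?_natCast]; exact List.getElem?_eq_none (by omega)
      rw [solutionLoopA, ga]
      have : a.drop i = [] := List.drop_eq_nil_of_le (by omega)
      simp [this, gainN_nil]

-- min of a nonempty list is the head value of its sorted version
theorem min_eq_sorted_head (a : List Int) (x m : Int) (t : List Int)
    (hmin : PySem.List.min? a (fun z => z) = some x)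
    (hs : PySem.List.sorted a (fun z => z) false = m :: t) : m = x := by
  have hxa : x ∈ a := PySem.List.min?_mem hmin
  have hma : m ∈ a := by
    have := (PySem.List.mem_sorted a (fun z => z) false m).mp
    exact this (by rw [hs]; exact List.mem_cons_self)
  exact le_antisymm (PySem.List.key_head_sorted_le a (fun z => z) hs x hxa)
    (PySem.List.min?_isMin hmin m hma)

-- removing the min takes the tail of the sorted list
theorem sorted_remove_min (a : List Int) (x m : Int) (t : List Int)
    (hmin : PySem.List.min? a (fun z => z) = some x)
    (hs : PySem.List.sorted a (fun z => z) false = m :: t) :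
    PySem.List.sorted (a.erase x) (fun z => z) false = t := by
  have hm : m = x := min_eq_sorted_head a x m t hmin hs
  subst hm
  have hperm : (PySem.List.sorted a (fun z => z) false).Perm a :=
    PySem.List.sorted_perm a (fun z => z) false
  have hperm' : (a.erase m).Perm ((m :: t).erase m) := by
    rw [← hs]; exact (hperm.erase m).symm
  have htp : t.Perm (a.erase m) := by
    simpa using hperm'.symm
  have hpw : t.Pairwise (fun p q : Int => p ≤ q) := by
    have := PySem.List.sorted_pairwise a (fun z => z)
    rw [hs] at this
    exact this.tail
  exact PySem.List.sorted_id_eq_of_perm_of_pairwise (a.erase m) t htp hpw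

-- the selection loop computes sum(a) plus the budget-limited gain over the sorted zips
theorem solutionSelLoop_eq (n : Nat) :
    ∀ (a : List Int), a.length ≤ n → ∀ (b : List Int) (k total : Int),
    solutionSelLoop k a b total =
      total + a.sum + gainN k.toNat
        ((PySem.List.sorted a (fun z => z) false).zip
         (PySem.List.sorted b (fun z => z) false)) := by
  induction n with
  | zero =>
    intro a ha b k total
    have : a = [] := List.eq_nil_of_length_eq_zero (Nat.le_zero.mp ha)
    subst this
    rw [solutionSelLoop]
    have hnil : PySem.List.sorted ([] : List Int) (fun z => z) false = [] :=
      (PySem.List.sorted_eq_nil_iff _ _ _).mpr rfl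
    simp [hnil, gainN_nil]
  | succ n ih =>
    intro a ha b k total
    rw [solutionSelLoop]
    by_cases hc : k > 0 ∧ a ≠ [] ∧ b ≠ []
    · obtain ⟨hk, hane, hbne⟩ := hc
      simp only [hk, hane, hbne, and_self, if_true, ne_eq, not_false_iff]
      obtain ⟨x, hx⟩ : ∃ x, PySem.List.min? a (fun z => z) = some x := by
        cases hmx : PySem.List.min? a (fun z => z) with
        | none => exact absurd ((PySem.List.min?_eq_none_iff a (fun z => z)).mp hmx) hane
        | some v => exact ⟨v, rfl⟩
      obtain ⟨y, hy⟩ : ∃ y, PySem.List.min? b (fun z => z) = some y := by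
        cases hmy : PySem.List.min? b (fun z => z) with
        | none => exact absurd ((PySem.List.min?_eq_none_iff b (fun z => z)).mp hmy) hbne
        | some v => exact ⟨v, rfl⟩
      rw [hx, hy]
      obtain ⟨ma, ta, hsa⟩ : ∃ m t, PySem.List.sorted a (fun z => z) false = m :: t := by
        cases hsa : PySem.List.sorted a (fun z => z) false with
        | nil => exact absurd ((PySem.List.sorted_eq_nil_iff _ _ _).mp hsa) hane
        | cons m t => exact ⟨m, t, rfl⟩
      obtain ⟨mb, tb, hsb⟩ : ∃ m t, PySem.List.sorted b (fun z => z) false = m :: t := by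
        cases hsb : PySem.List.sorted b (fun z => z) false with
        | nil => exact absurd ((PySem.List.sorted_eq_nil_iff _ _ _).mp hsb) hbne
        | cons m t => exact ⟨m, t, rfl⟩
      have hmax : ma = x := min_eq_sorted_head a x ma ta hx hsa
      have hmby : mb = y := min_eq_sorted_head b y mb tb hy hsb
      have hkpos : k.toNat = (k - 1).toNat + 1 := by omega
      rw [hsa, hsb, hmax, hmby, hkpos]
      simp only [List.zip_cons_cons, gainN]
      by_cases hge : x ≥ y
      · have hnl : ¬ x < y := by omega
        simp [hge, hnl]
      · have hl : x < y := by omega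
        simp only [hge, if_false, hl, if_true]
        have hxa : x ∈ a := PySem.List.min?_mem hx
        have hyb : y ∈ b := PySem.List.min?_mem hy
        rw [PySem.List.remove?_eq_some_erase a x hxa, PySem.List.remove?_eq_some_erase b y hyb]
        have hlen : (a.erase x).length ≤ n := by
          have := List.length_erase_of_mem hxa
          omega
        show solutionSelLoop (k - 1) (a.erase x) (b.erase y) (total + y) =
          total + a.sum + (y - x + gainN (k - 1).toNat (ta.zip tb))
        rw [ih (a.erase x) hlen (b.erase y) (k - 1) (total + y)]
        rw [sorted_remove_min a x ma ta hx hsa, sorted_remove_min b y mb tb hy hsb]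
        have hsum : (a.erase x).sum = a.sum - x := by
          have hperm : (x :: a.erase x).Perm a := List.perm_cons_erase hxa |>.symm
          have := hperm.sum_eq
          simp only [List.sum_cons] at this
          omega
        rw [hsum]
        ring
    · simp only [hc, if_false]
      rcases not_and_or.mp hc with hk | hab
      · have : k.toNat = 0 := by omega
        simp [this, gainN]
      · rcases not_and_or.mp hab with hA | hB
        · have : a = [] := not_not.mp hA
          subst this
          have hnil : PySem.List.sorted ([] : List Int) (fun z => z) false = [] :=
            (PySem.List.sorted_eq_nil_iff _ _ _).mpr rfl
          simp [hnil, gainN_nil]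
        · have : b = [] := not_not.mp hB
          subst this
          have hnil : PySem.List.sorted ([] : List Int) (fun z => z) false = [] :=
            (PySem.List.sorted_eq_nil_iff _ _ _).mpr rfl
          simp [hnil, gainN_nil]

-- ===== VERDICT (by name: the statement is the Claim_ definition above) =====
theorem solution_spec : Claim_equal_solution := by
  intro N K la lb _ _
  unfold Spec_solution solution solution_alt
  rw [solutionSelLoop_eq la.length la (le_refl _) lb K 0]
  rw [solutionLoopA_sum K.toNat 0]
  simp only [List.drop_zero, zero_add]
  have : (PySem.List.sorted la (fun x => x) false).sum = la.sum :=
    (PySem.List.sorted_perm la (fun x => x) false).sum_eq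
  rw [this]
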